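-- pv_equiv track=rewrite | github.com/cokice/List-of-genshin-University | verify-url.py | reshape_pinyin
-- ===== SOURCE A (Python) =====
-- def reshape_pinyin(l):
--     o = []
--     first = []
--     second = []
--     for i in l:
--         if len(i[0]) == 1 or i[0][0] == "":
--             if first:
--                 o.append(first)
--                 o.append(second)
--                 first = []
--                 second = []
--             o.append(i[0])
--         else:
--             first.append(i[0][0])
--             second.append(i[0][1])
--     if first:
--         o.append(first)
--         o.append(second)
--     return o
-- ===== SOURCE B (Python) =====
-- def reshape_pinyin(l):
--     def sep(i):
--         return len(i[0]) == 1 or i[0][0] == ""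
--     o = []
--     n = len(l)
--     j = 0
--     while j < n:
--         s = sep(l[j])
--         k = j + 1
--         while k < n and sep(l[k]) == s:
--             k += 1
--         run = l[j:k]
--         if s:
--             for x in run:
--                 o.append(x[0])
--         else:
--             o.append([x[0][0] for x in run])
--             o.append([x[0][1] for x in run])
--         j = k
--     return o
-- ===== Notes on version B (the rewrite author's own statement) =====
-- stated objective: alternative
-- what changed: Replaces A's accumulate-and-flush loop with mutable first/second buffers by a run-based pass: split l into maximal runs of separator/non-separator rows and emit each run at once (separator rows individually, a non-separator run as its two column lists).
import Mathlib
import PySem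

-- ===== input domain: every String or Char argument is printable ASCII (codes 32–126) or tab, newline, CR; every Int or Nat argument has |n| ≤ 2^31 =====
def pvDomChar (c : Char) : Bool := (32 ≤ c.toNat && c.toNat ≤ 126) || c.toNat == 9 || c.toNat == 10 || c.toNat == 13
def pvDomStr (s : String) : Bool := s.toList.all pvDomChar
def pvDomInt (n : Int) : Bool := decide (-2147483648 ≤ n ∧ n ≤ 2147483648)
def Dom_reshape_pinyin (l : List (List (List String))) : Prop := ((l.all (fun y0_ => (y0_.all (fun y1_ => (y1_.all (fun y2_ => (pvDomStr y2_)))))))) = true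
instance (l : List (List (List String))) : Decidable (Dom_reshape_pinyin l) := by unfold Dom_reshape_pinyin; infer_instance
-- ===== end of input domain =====

-- B replaces A's accumulate-and-flush loop (mutable first/second buffers) by a run-based pass over
-- maximal separator / non-separator runs; same cost, different decomposition (objective: alternative).

-- ===== PORT A =====
-- literal transliteration of A's loop: o, first, second are the three accumulators
def reshapeA (rest : List (List (List String))) (o : List (List String)) (first second : List String) :
    List (List String) :=
  match rest with
  | [] => if first ≠ [] then o ++ [first, second] else o
  | i :: rest =>
    let i0 := PySem.List.pyGetD i 0 []    -- i[0] (in range under Pre_)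
    if i0.length = 1 ∨ PySem.List.pyGetD i0 0 "" = "" then
      let o' := if first ≠ [] then o ++ [first, second] else o
      reshapeA rest (o' ++ [i0]) [] []
    else
      reshapeA rest o (first ++ [PySem.List.pyGetD i0 0 ""]) (second ++ [PySem.List.pyGetD i0 1 ""])

def reshape_pinyin (l : List (List (List String))) : List (List String) :=
  reshapeA l [] [] []

-- ===== PORT B =====
-- Source B's sep predicate
def sepB (i : List (List String)) : Bool :=
  let i0 := PySem.List.pyGetD i 0 []
  i0.length == 1 || PySem.List.pyGetD i0 0 "" == ""

-- Source B's outer while loop: peel off one maximal run of rows with the same sep value, emit it, recurse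
def reshapeB : List (List (List String)) → List (List String)
  | [] => []
  | x :: xs =>
    let s := sepB x
    let run := (x :: xs).takeWhile (fun y => sepB y == s)
    let rest := (x :: xs).dropWhile (fun y => sepB y == s)
    (if s then run.map (fun y => PySem.List.pyGetD y 0 [])
     else [run.map (fun y => PySem.List.pyGetD (PySem.List.pyGetD y 0 []) 0 ""),
           run.map (fun y => PySem.List.pyGetD (PySem.List.pyGetD y 0 []) 1 "")]) ++ reshapeB rest
termination_by l => l.length
decreasing_by
  simp only [List.dropWhile]
  have : (sepB x == sepB x) = true := by simp
  rw [this]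
  simp only [List.length_cons]
  exact Nat.lt_succ_of_le (List.length_dropWhile_le _ _)

def reshape_pinyin_alt (l : List (List (List String))) : List (List String) :=
  reshapeB l

-- ===== PRECONDITION & SPEC =====
-- Pre_ excludes exactly the inputs where Python A raises IndexError: some row is empty, or its first entry is empty.
def Pre_reshape_pinyin (l : List (List (List String))) : Prop :=
  ∀ i ∈ l, 0 < i.length ∧ 0 < (PySem.List.pyGetD i 0 []).length
instance (l : List (List (List String))) : Decidable (Pre_reshape_pinyin l) := by
  unfold Pre_reshape_pinyin; infer_instance

def pvWitness_reshape_pinyin : List (List (List String)) := [[["ni", "hao"]], [["a"]]]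

def Spec_reshape_pinyin (l : List (List (List String))) (out : List (List String)) : Prop := out = reshape_pinyin_alt l
instance (l : List (List (List String))) (out : List (List String)) : Decidable (Spec_reshape_pinyin l out) := by unfold Spec_reshape_pinyin; infer_instance

-- ===== CLAIM (what is proved, stated in full; the proofs are below) =====
def Claim_equal_reshape_pinyin : Prop := ∀ (l : List (List (List String))), Dom_reshape_pinyin l → Pre_reshape_pinyin l → Spec_reshape_pinyin l (reshape_pinyin l)

-- ===== LEMMAS AND PROOFS =====

-- notation shortcuts for the proofs
def get0 (y : List (List String)) : List String := PySem.List.pyGetD y 0 []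
def g00 (y : List (List String)) : String := PySem.List.pyGetD (PySem.List.pyGetD y 0 []) 0 ""
def g01 (y : List (List String)) : String := PySem.List.pyGetD (PySem.List.pyGetD y 0 []) 1 ""
def nsep (y : List (List String)) : Bool := !sepB y
def flush (f s : List String) : List (List String) := if f ≠ [] then [f, s] else []

-- A's branch condition is decided exactly by sepB
lemma sepA_iff (i : List (List String)) :
    ((PySem.List.pyGetD i 0 []).length = 1 ∨ PySem.List.pyGetD (PySem.List.pyGetD i 0 []) 0 "" = "")
      ↔ sepB i = true := by
  simp [sepB]

-- reshapeA only ever appends to o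
lemma reshapeA_out (rest : List (List (List String))) (o : List (List String)) (first second : List String) :
    reshapeA rest o first second = o ++ reshapeA rest [] first second := by
  induction rest generalizing o first second with
  | nil =>
    simp only [reshapeA]
    split_ifs <;> simp
  | cons i rest ih =>
    simp only [reshapeA]
    split_ifs with hs hf
    · conv_rhs => rw [ih]
      rw [ih]; simp
    · conv_rhs => rw [ih]
      rw [ih]; simp
    · conv_rhs => rw [ih]
      rw [ih]; simp

-- peeling one maximal sep-run off the front of reshapeB
lemma reshapeB_sep_peel (xs : List (List (List String))) :
    reshapeB xs =
      (xs.takeWhile sepB).map get0 ++ reshapeB (xs.dropWhile sepB) := by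
  cases xs with
  | nil => simp [reshapeB]
  | cons x xs =>
    by_cases hx : sepB x = true
    · rw [reshapeB]
      simp only [hx]
      simp [List.takeWhile, List.dropWhile, hx, get0]
    · have hx' : sepB x = false := by simpa using hx
      simp [List.takeWhile, List.dropWhile, hx']

-- peeling one maximal non-sep-run off the front of reshapeB
lemma reshapeB_nsep_peel (xs : List (List (List String))) :
    reshapeB xs =
      flush ((xs.takeWhile nsep).map g00) ((xs.takeWhile nsep).map g01)
        ++ reshapeB (xs.dropWhile nsep) := by
  cases xs with
  | nil => simp [reshapeB, flush]
  | cons x xs =>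
    by_cases hx : sepB x = true
    · have hn : nsep x = false := by simp [nsep, hx]
      simp [List.takeWhile, List.dropWhile, hn, flush]
    · have hx' : sepB x = false := by simpa using hx
      have hn : nsep x = true := by simp [nsep, hx']
      have hpred : (fun y => sepB y == false) = nsep := by
        funext y; cases h : sepB y <;> simp [h, nsep]
      rw [reshapeB]
      simp only [hx']
      rw [hpred]
      simp [hn, flush]
      constructor <;> exact ⟨rfl, fun a _ => rfl⟩

-- main invariant: A's loop from state (pf, ps) equals the pending flush plus B's run pass
lemma reshapeA_eq_pend (xs : List (List (List String))) (pf ps : List String) :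
    reshapeA xs [] pf ps =
      flush (pf ++ (xs.takeWhile nsep).map g00) (ps ++ (xs.takeWhile nsep).map g01)
        ++ reshapeB (xs.dropWhile nsep) := by
  induction xs generalizing pf ps with
  | nil => simp [reshapeA, flush, reshapeB]
  | cons x xs ih =>
    by_cases hx : sepB x = true
    · have hn : nsep x = false := by simp [nsep, hx]
      have hcond := (sepA_iff x).mpr hx
      rw [reshapeA]
      simp only [if_pos hcond]
      rw [reshapeA_out, ih [] []]
      have hB : reshapeB (x :: xs) = get0 x :: reshapeB xs := by
        rw [reshapeB_sep_peel (x :: xs)]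
        simp only [List.takeWhile, List.dropWhile, hx, List.map_cons, List.cons_append]
        rw [← reshapeB_sep_peel xs]
      simp only [List.takeWhile, List.dropWhile, hn, List.map_nil, List.append_nil,
        List.nil_append]
      rw [hB, ← reshapeB_nsep_peel xs]
      unfold flush get0
      split_ifs <;> simp
    · have hx' : sepB x = false := by simpa using hx
      have hn : nsep x = true := by simp [nsep, hx']
      have hcond : ¬ ((PySem.List.pyGetD x 0 []).length = 1 ∨
          PySem.List.pyGetD (PySem.List.pyGetD x 0 []) 0 "" = "") := by
        intro h; rw [sepA_iff] at h; exact hx h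
      rw [reshapeA]
      simp only [if_neg hcond]
      rw [ih]
      simp [List.takeWhile, List.dropWhile, hn, g00, g01]

-- ===== VERDICT (by name: the statement is the Claim_ definition above) =====
theorem reshape_pinyin_spec : Claim_equal_reshape_pinyin := by
  intro l _ _
  unfold Spec_reshape_pinyin reshape_pinyin reshape_pinyin_alt
  rw [reshapeA_eq_pend l [] []]
  simp only [List.nil_append]
  exact (reshapeB_nsep_peel l).symm
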